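-- pv_equiv track=rewrite | github.com/erthtry-io/erthtry.io_5 | main.py | attributes_filter
-- ===== SOURCE A (Python) =====
-- from collections import defaultdict
--
-- def attributes_filter(column, min_value):
--     """
--     Функция для фильтрации атрибутов в столбце.
--
--     Аргументы:
--     - column: столбец данных
--     - min_value: минимальное значение для отбора атрибутов
--
--     Возвращает:
--     - attributes_sorted: отфильтрованный и отсортированный список атрибутов
--     """
--     key_sorted = defaultdict(int)
--     for line in column:
--         if line is not None:
--             for key in line:
--                 key_sorted[key] += 1
--     key_filtered = {key: value for key, value in key_sorted.items() if value >= min_value}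
--     attributes_sorted = sorted(key_filtered.items(), key=lambda x: x[1], reverse=True)
--     return attributes_sorted
-- ===== SOURCE B (Python) =====
-- def attributes_filter(column, min_value):
--     counts = {}
--     for line in column:
--         if line is not None:
--             for key in line:
--                 counts[key] = counts.get(key, 0) + 1
--     filtered = [(k, v) for k, v in counts.items() if v >= min_value]
--     distinct = sorted({v for _, v in filtered}, reverse=True)
--     return [item for c in distinct for item in filtered if item[1] == c]
-- ===== Notes on version B (the rewrite author's own statement) =====
-- stated objective: alternative
-- what changed: The final sorted(..., key=count, reverse=True) over the (key,count) pairs is replaced by a group-by: sort only the distinct counts descending and concatenate, for each count, the filtered pairs with that count in their first-occurrence order.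
import Mathlib
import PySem

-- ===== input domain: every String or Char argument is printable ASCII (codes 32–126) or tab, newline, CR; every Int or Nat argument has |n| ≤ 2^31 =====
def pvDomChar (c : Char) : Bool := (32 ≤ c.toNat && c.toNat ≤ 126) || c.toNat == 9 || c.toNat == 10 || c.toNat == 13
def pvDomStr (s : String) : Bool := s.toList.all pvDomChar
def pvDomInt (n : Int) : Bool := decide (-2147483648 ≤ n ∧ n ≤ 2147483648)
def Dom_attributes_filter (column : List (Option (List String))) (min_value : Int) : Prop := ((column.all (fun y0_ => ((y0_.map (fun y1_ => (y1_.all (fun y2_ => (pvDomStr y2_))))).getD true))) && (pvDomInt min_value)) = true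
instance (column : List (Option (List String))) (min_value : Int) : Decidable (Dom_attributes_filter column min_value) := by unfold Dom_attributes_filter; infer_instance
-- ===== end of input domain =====

-- ===== PORT A =====
-- B replaces the final key-sort of the (key,count) pairs by a group-by over the distinct counts
-- in descending order; same return value, different decomposition (objective: alternative).

-- A's counting loop (defaultdict(int); key_sorted[key] += 1)
def pvCountA (column : List (Option (List String))) : PySem.Dict String Int :=
  column.foldl (fun d line =>
    match line with
    | none => d
    | some l => l.foldl (fun d key => d.modify key 0 (· + 1)) d) PySem.Dict.empty

def attributes_filter (column : List (Option (List String))) (min_value : Int) : List (String × Int) :=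
  PySem.List.sorted
    (((pvCountA column).items.filter (fun p => decide (min_value ≤ p.2))).foldl
      (fun d p => d.insert p.1 p.2) PySem.Dict.empty).items
    (fun x => x.2) true

-- ===== PORT B =====
-- B's counting loop (counts[key] = counts.get(key, 0) + 1)
def pvCountB (column : List (Option (List String))) : PySem.Dict String Int :=
  column.foldl (fun d line =>
    match line with
    | none => d
    | some l => l.foldl (fun d key => d.insert key (d.getD key 0 + 1)) d) PySem.Dict.empty

-- filtered = [(k, v) for k, v in counts.items() if v >= min_value]
def pvFiltered (column : List (Option (List String))) (min_value : Int) : List (String × Int) :=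
  (pvCountB column).items.filter (fun p => decide (min_value ≤ p.2))

-- distinct = sorted({v for _, v in filtered}, reverse=True)
def pvDistinct (column : List (Option (List String))) (min_value : Int) : List Int :=
  PySem.List.sorted (PySem.Set.ofList ((pvFiltered column min_value).map (fun p => p.2)))
    (fun c => c) true

def attributes_filter_alt (column : List (Option (List String))) (min_value : Int) : List (String × Int) :=
  (pvDistinct column min_value).flatMap
    (fun c => (pvFiltered column min_value).filter (fun p => p.2 == c))

-- ===== PRECONDITION & SPEC =====
def Spec_attributes_filter (column : List (Option (List String))) (min_value : Int) (out : List (String × Int)) : Prop := out = attributes_filter_alt column min_value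
instance (column : List (Option (List String))) (min_value : Int) (out : List (String × Int)) : Decidable (Spec_attributes_filter column min_value out) := by unfold Spec_attributes_filter; infer_instance

-- ===== CLAIM (what is proved, stated in full; the proofs are below) =====
def Claim_equal_attributes_filter : Prop := ∀ (column : List (Option (List String))) (min_value : Int), Dom_attributes_filter column min_value → Spec_attributes_filter column min_value (attributes_filter column min_value)

-- ===== LEMMAS AND PROOFS =====

-- structural unfolding of PySem.List.insertBy on a cons
theorem insertBy_cons_eq (before : (String × Int) → (String × Int) → Bool) (x y : String × Int) (ys : List (String × Int)) :
    PySem.List.insertBy before x (y :: ys) = if before x y then x :: y :: ys else y :: PySem.List.insertBy before x ys := rfl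

theorem insertBy_append_not_before (before : (String × Int) → (String × Int) → Bool) (x : String × Int)
    (l t : List (String × Int)) (h : ∀ y ∈ l, before x y = false) :
    PySem.List.insertBy before x (l ++ t) = l ++ PySem.List.insertBy before x t := by
  induction l with
  | nil => rfl
  | cons y ys ih =>
    have hy : before x y = false := h y (by simp)
    simp only [List.cons_append, insertBy_cons_eq, hy, if_neg Bool.false_ne_true,
      ih (fun z hz => h z (by simp [hz]))]

-- inserting x into a descending bucket concatenation appends x to the end of its bucket
theorem insertBy_flatMap (cs : List Int) (F : Int → List (String × Int)) (x : String × Int)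
    (hpw : cs.Pairwise (· > ·)) (hmem : x.2 ∈ cs)
    (hF : ∀ c ∈ cs, ∀ y ∈ F c, y.2 = c) :
    PySem.List.insertBy (fun a b => decide (b.2 < a.2)) x (cs.flatMap F)
      = cs.flatMap (fun c => if c = x.2 then F c ++ [x] else F c) := by
  induction cs with
  | nil => simp at hmem
  | cons c cs ih =>
    rcases List.pairwise_cons.mp hpw with ⟨hgt, hpw'⟩
    have hkeytail : ∀ y ∈ cs.flatMap F, y.2 < c := by
      intro y hy
      rcases List.mem_flatMap.mp hy with ⟨c', hc', hyc'⟩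
      have := hF c' (by simp [hc']) y hyc'
      rw [this]; exact hgt c' hc'
    by_cases hc : c = x.2
    · have hhd : ∀ y ∈ F c, (fun a b : String × Int => decide (b.2 < a.2)) x y = false := by
        intro y hy
        have := hF c (by simp) y hy
        simp [this, hc]
      have htail : PySem.List.insertBy (fun a b : String × Int => decide (b.2 < a.2)) x (cs.flatMap F)
          = x :: cs.flatMap F := by
        cases hfm : cs.flatMap F with
        | nil => rfl
        | cons z zs =>
          have hz : z.2 < x.2 := hc ▸ hkeytail z (by rw [hfm]; simp)
          rw [insertBy_cons_eq]
          simp [hz]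
      have hrest : cs.flatMap (fun c' => if c' = x.2 then F c' ++ [x] else F c') = cs.flatMap F := by
        apply List.flatMap_congr
        intro c' hc'
        have : c' < x.2 := by rw [← hc]; exact hgt c' hc'
        simp [show ¬ c' = x.2 by omega]
      rw [List.flatMap_cons, List.flatMap_cons,
        insertBy_append_not_before _ x (F c) (cs.flatMap F) hhd, htail, if_pos hc, hrest]
      simp
    · have hx : x.2 ∈ cs := by
        rcases List.mem_cons.mp hmem with h | h
        · exact absurd h.symm hc
        · exact h
      have hxc : x.2 < c := hgt _ hx
      have hhead : ∀ y ∈ F c, (fun a b : String × Int => decide (b.2 < a.2)) x y = false := by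
        intro y hy
        have := hF c (by simp) y hy
        simp [this]; omega
      rw [List.flatMap_cons, List.flatMap_cons,
        insertBy_append_not_before _ x (F c) (cs.flatMap F) hhead,
        ih hpw' hx (fun c' hc' y hy => hF c' (by simp [hc']) y hy), if_neg hc]

-- stable descending sort by the Int component = group-by over strictly descending counts
theorem sorted_rev_eq_buckets (xs : List (String × Int)) (cs : List Int)
    (hpw : cs.Pairwise (· > ·)) (hmem : ∀ p ∈ xs, p.2 ∈ cs) :
    PySem.List.sorted xs (fun x => x.2) true = cs.flatMap (fun c => xs.filter (fun p => p.2 == c)) := by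
  induction xs using List.reverseRecOn with
  | nil => simp [PySem.List.sorted]
  | append_singleton xs x ih =>
    rw [PySem.List.sorted_rev_eq_foldl_insertBy, List.foldl_append,
      ← PySem.List.sorted_rev_eq_foldl_insertBy,
      ih (fun p hp => hmem p (by simp [hp]))]
    simp only [List.foldl_cons, List.foldl_nil]
    rw [insertBy_flatMap cs _ x hpw (hmem x (by simp))
      (by intro c hc y hy; simpa using (List.mem_filter.mp hy).2)]
    apply List.flatMap_congr
    intro c hc
    rw [List.filter_append]
    by_cases h : c = x.2
    · simp [h]
    · simp [h, show x.2 ≠ c from fun e => h e.symm]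

-- keys stay Nodup through the counting loop over the whole column
theorem nodup_keys_counts (column : List (Option (List String))) (d : PySem.Dict String Int)
    (hd : d.keys.Nodup) :
    (column.foldl (fun d line =>
      match line with
      | none => d
      | some l => l.foldl (fun d key => d.insert key (d.getD key 0 + 1)) d) d).keys.Nodup := by
  induction column generalizing d with
  | nil => exact hd
  | cons line rest ih =>
    cases line with
    | none => exact ih d hd
    | some l =>
      exact ih _ (PySem.Dict.nodup_keys_foldl_insert l (fun d k => d.getD k 0 + 1) d hd)

-- ===== VERDICT (by name: the statement is the Claim_ definition above) =====
theorem attributes_filter_spec : Claim_equal_attributes_filter := by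
  intro column min_value _
  unfold Spec_attributes_filter attributes_filter attributes_filter_alt
  -- Dict.modify key 0 (· + 1) IS insert key (getD key 0 + 1) by definition: same counting dict
  have hcount : pvCountA column = pvCountB column := rfl
  rw [hcount]
  -- the dict comprehension rebuilt from the filtered items has exactly those items
  have hnodupkeys : (pvCountB column).keys.Nodup :=
    nodup_keys_counts column PySem.Dict.empty PySem.Dict.nodup_keys_empty
  have hnodupfst : ((pvFiltered column min_value).map Prod.fst).Nodup := by
    have hsub : (pvFiltered column min_value).Sublist (pvCountB column).items :=
      List.filter_sublist
    exact (hsub.map Prod.fst).nodup hnodupkeys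
  have hitems : (((pvFiltered column min_value).foldl (fun d p => d.insert p.1 p.2)
      PySem.Dict.empty) : PySem.Dict String Int).items = pvFiltered column min_value := by
    rw [PySem.Dict.items_foldl_insert_fresh (pvFiltered column min_value) Prod.fst Prod.snd
      PySem.Dict.empty (fun a _ => PySem.Dict.contains_empty _) hnodupfst]
    simp [PySem.Dict.empty]
  rw [show ((pvCountB column).items.filter (fun p => decide (min_value ≤ p.2)))
      = pvFiltered column min_value from rfl, hitems]
  -- the sorted distinct counts are strictly descending and cover every filtered value
  have hnodupd : (pvDistinct column min_value).Nodup := by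
    unfold pvDistinct
    exact ((PySem.List.sorted_perm _ _ _).symm.nodup (PySem.Set.nodup_ofList _))
  have hge : (pvDistinct column min_value).Pairwise (fun a b : Int => b ≤ a) := by
    have := PySem.List.sorted_pairwise_rev
      (PySem.Set.ofList ((pvFiltered column min_value).map (fun p => p.2))) (fun c => c)
    simpa [pvDistinct] using this
  have hpw : (pvDistinct column min_value).Pairwise (· > ·) :=
    (hge.and hnodupd).imp (fun h => lt_of_le_of_ne h.1 (Ne.symm h.2))
  have hmem : ∀ p ∈ pvFiltered column min_value, p.2 ∈ pvDistinct column min_value := by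
    intro p hp
    unfold pvDistinct
    rw [PySem.List.mem_sorted, PySem.Set.mem_ofList]
    exact List.mem_map.mpr ⟨p, hp, rfl⟩
  exact sorted_rev_eq_buckets (pvFiltered column min_value) (pvDistinct column min_value) hpw hmem
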